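-- pv_equiv track=rewrite | github.com/pikaxinge/assignment1-basics | cs336_basics/pretokenization_example.py | find_chunk_boundaries_text
-- ===== SOURCE A (Python) =====
-- def find_chunk_boundaries_text(
--     text: str,
--     desired_num_chunks: int,
--     split_special_token: str,
-- ) -> list[int]:
--     """Divide chunk boundaries near special tokens in an in-memory string.
--
--     Semantics similar to find_chunk_boundaries:
--     - First divide evenly into desired_num_chunks parts;
--     - Then scan forward from each internal boundary to find the next special token occurrence;
--     - If not found, place the boundary at the end of text;
--     - Finally deduplicate and sort boundaries.
--     """
--
--     length = len(text)
--     if length == 0 or desired_num_chunks <= 1: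
--         return [0, length]
--
--     chunk_size = length // desired_num_chunks
--
--     boundaries = [i * chunk_size for i in range(desired_num_chunks + 1)]
--     boundaries[-1] = length
--
--     if not split_special_token:
--         return sorted(set(boundaries))
--
--     for bi in range(1, len(boundaries) - 1):
--         start_pos = boundaries[bi]
--         found_at = text.find(split_special_token, start_pos)
--         if found_at == -1:
--             boundaries[bi] = length
--         else:
--             boundaries[bi] = found_at
--
--     return sorted(set(boundaries))
-- ===== SOURCE B (Python) =====
-- def _next_from(occ, length, start, j):
--     """Advance pointer j past occurrences < start; return (value, new pointer)."""
--     while j < len(occ) and occ[j] < start: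
--         j += 1
--     return (occ[j] if j < len(occ) else length), j
--
--
-- def find_chunk_boundaries_text(
--     text: str,
--     desired_num_chunks: int,
--     split_special_token: str,
-- ) -> list[int]:
--     length = len(text)
--     if length == 0 or desired_num_chunks <= 1:
--         return [0, length]
--
--     cs = length // desired_num_chunks
--
--     if not split_special_token:
--         return sorted({i * cs for i in range(desired_num_chunks)} | {length})
--
--     m = len(split_special_token)
--     # every occurrence start position, found in one left-to-right pass
--     occ = [p for p in range(length - m + 1) if text[p:p + m] == split_special_token]
--
--     # internal boundary starts are nondecreasing, so one forward pointer
--     # over occ serves them all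
--     inner = []
--     j = 0
--     for i in range(1, desired_num_chunks):
--         v, j = _next_from(occ, length, i * cs, j)
--         inner.append(v)
--
--     return sorted({0, length} | set(inner))
-- ===== Notes on version B (the rewrite author's own statement) =====
-- stated objective: alternative
-- what changed: Instead of re-scanning the text with text.find from every internal boundary and patching a list in place, B collects all token occurrence positions in one pass and serves the nondecreasing boundary starts with a single forward pointer (merge-style), assembling the result functionally.
import Mathlib
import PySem

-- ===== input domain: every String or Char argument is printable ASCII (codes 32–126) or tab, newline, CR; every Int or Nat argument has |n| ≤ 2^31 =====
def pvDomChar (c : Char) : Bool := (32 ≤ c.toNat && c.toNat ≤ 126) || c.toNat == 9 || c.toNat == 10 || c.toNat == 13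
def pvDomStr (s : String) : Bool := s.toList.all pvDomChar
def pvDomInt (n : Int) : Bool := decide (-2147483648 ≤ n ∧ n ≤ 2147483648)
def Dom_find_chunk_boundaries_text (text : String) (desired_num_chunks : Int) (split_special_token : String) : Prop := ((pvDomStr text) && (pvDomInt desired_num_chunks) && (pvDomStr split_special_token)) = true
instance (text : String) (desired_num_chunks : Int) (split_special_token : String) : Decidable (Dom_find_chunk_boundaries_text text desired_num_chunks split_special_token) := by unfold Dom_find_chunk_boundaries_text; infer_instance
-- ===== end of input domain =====

-- Alternative: B replaces A's per-boundary text.find scans and in-place list patching by one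
-- occurrence pass over the text plus a single forward pointer over the (nondecreasing) boundary
-- starts; same return value, proved equal.

-- ===== PORT A =====
def find_chunk_boundaries_text (text : String) (desired_num_chunks : Int) (split_special_token : String) : List Int :=
  let length := PySem.Str.len text
  if length = 0 ∨ desired_num_chunks ≤ 1 then [0, length]
  else
    let chunk_size := PySem.Int.floordiv length desired_num_chunks
    let boundaries := (PySem.List.pyRange 0 (desired_num_chunks + 1)).map (fun i => i * chunk_size)
    let boundaries := PySem.List.pySetD boundaries (-1) length
    if split_special_token = "" then
      PySem.List.sorted (PySem.Set.ofList boundaries) (fun x => x)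
    else
      let boundaries :=
        (PySem.List.pyRange 1 (PySem.List.len boundaries - 1)).foldl
          (fun bs bi =>
            let start_pos := PySem.List.pyGetD bs bi 0
            let found_at := PySem.Str.findFrom text split_special_token start_pos
            if found_at = -1 then PySem.List.pySetD bs bi length
            else PySem.List.pySetD bs bi found_at)
          boundaries
      PySem.List.sorted (PySem.Set.ofList boundaries) (fun x => x)

-- ===== PORT B =====
-- Source B's _next_from: advance the pointer j past occurrences < start, return (value, new pointer)
def pvNextFrom (occ : List Int) (length start : Int) (j : Nat) : Int × Nat :=
  if h : j < occ.length then
    if occ[j] < start then pvNextFrom occ length start (j + 1)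
    else (occ[j], j)
  else (length, j)
termination_by occ.length - j

def find_chunk_boundaries_text_alt (text : String) (desired_num_chunks : Int) (split_special_token : String) : List Int :=
  let length := PySem.Str.len text
  if length = 0 ∨ desired_num_chunks ≤ 1 then [0, length]
  else
    let cs := PySem.Int.floordiv length desired_num_chunks
    if split_special_token = "" then
      PySem.List.sorted
        (PySem.Set.union (PySem.Set.ofList ((PySem.List.pyRange 0 desired_num_chunks).map (fun i => i * cs))) [length])
        (fun x => x)
    else
      let m := PySem.Str.len split_special_token
      let occ := (PySem.List.pyRange 0 (length - m + 1)).filter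
        (fun p => PySem.Str.slice text (some p) (some (p + m)) == split_special_token)
      let st := (PySem.List.pyRange 1 desired_num_chunks).foldl
        (fun (st : List Int × Nat) i =>
          let vj := pvNextFrom occ length (i * cs) st.2
          (st.1 ++ [vj.1], vj.2)) ([], 0)
      PySem.List.sorted (PySem.Set.union (PySem.Set.ofList [0, length]) st.1) (fun x => x)

-- ===== PRECONDITION & SPEC =====
def Spec_find_chunk_boundaries_text (text : String) (desired_num_chunks : Int) (split_special_token : String) (out : List Int) : Prop := out = find_chunk_boundaries_text_alt text desired_num_chunks split_special_token
instance (text : String) (desired_num_chunks : Int) (split_special_token : String) (out : List Int) : Decidable (Spec_find_chunk_boundaries_text text desired_num_chunks split_special_token out) := by unfold Spec_find_chunk_boundaries_text; infer_instance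

-- ===== CLAIM (what is proved, stated in full; the proofs are below) =====
def Claim_equal_find_chunk_boundaries_text : Prop := ∀ (text : String) (desired_num_chunks : Int) (split_special_token : String), Dom_find_chunk_boundaries_text text desired_num_chunks split_special_token → Spec_find_chunk_boundaries_text text desired_num_chunks split_special_token (find_chunk_boundaries_text text desired_num_chunks split_special_token)

-- ===== LEMMAS AND PROOFS =====

-- the first element of occ that satisfies pred (or L): the pure value pvNextFrom computes
def pvFirstGE (occ : List Int) (L s : Int) : Int :=
  match occ.find? (fun x => decide (s ≤ x)) with
  | some v => v
  | none => L

-- find? returns the first index whose element satisfies pred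
theorem pv_find?_of_first {α : Type} (p : α → Bool) :
    ∀ (l : List α) (j : Nat) (hj : j < l.length),
      (∀ q (hq : q < l.length), q < j → ¬ p l[q]) → p l[j] → l.find? p = some l[j] := by
  intro l
  induction l with
  | nil => intro j hj; simp at hj
  | cons x t ih =>
    intro j hj hlt hp
    cases j with
    | zero => simp_all
    | succ j' =>
      have hx : ¬ p x := by
        have := hlt 0 (by simp) (by omega)
        simpa using this
      rw [List.find?_cons_of_neg hx]
      have := ih j' (by simpa using hj)
        (fun q hq hql => by
          have := hlt (q+1) (by simpa using Nat.succ_lt_succ hq) (by omega)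
          simpa using this)
        (by simpa using hp)
      simpa using this

theorem pvNextFrom_spec (occ : List Int) (L s : Int) :
    ∀ (n j : Nat), occ.length - j ≤ n →
      (∀ q (hq : q < occ.length), q < j → occ[q] < s) →
      (pvNextFrom occ L s j).1 = pvFirstGE occ L s ∧
      (∀ q (hq : q < occ.length), q < (pvNextFrom occ L s j).2 → occ[q] < s) := by
  intro n
  induction n with
  | zero =>
    intro j hn hlt
    have hj : ¬ j < occ.length := by omega
    rw [pvNextFrom]
    simp only [hj, dite_false]
    refine ⟨?_, hlt⟩
    have hnone : occ.find? (fun x => decide (s ≤ x)) = none := by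
      rw [List.find?_eq_none]
      intro x hx
      obtain ⟨q, hq, rfl⟩ := List.mem_iff_getElem.mp hx
      have := hlt q hq (by omega)
      simp; omega
    simp [pvFirstGE, hnone]
  | succ n ih =>
    intro j hn hlt
    rw [pvNextFrom]
    by_cases hj : j < occ.length
    · simp only [hj, dite_true]
      by_cases hlt' : occ[j] < s
      · simp only [hlt', if_true]
        exact ih (j+1) (by omega)
          (fun q hq hql => by
            by_cases hq' : q = j
            · subst hq'; exact hlt'
            · exact hlt q hq (by omega))
      · simp only [hlt', if_false]
        refine ⟨?_, hlt⟩
        have : occ.find? (fun x => decide (s ≤ x)) = some occ[j] := by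
          apply pv_find?_of_first _ occ j hj
          · intro q hq hql
            have := hlt q hq hql
            simp; omega
          · simp; omega
        simp [pvFirstGE, this]
    · simp only [hj, dite_false]
      refine ⟨?_, hlt⟩
      have hnone : occ.find? (fun x => decide (s ≤ x)) = none := by
        rw [List.find?_eq_none]
        intro x hx
        obtain ⟨q, hq, rfl⟩ := List.mem_iff_getElem.mp hx
        have := hlt q hq (by omega)
        simp; omega
      simp [pvFirstGE, hnone]

-- B's pointer fold over nondecreasing starts computes the pure map
theorem pv_foldB (occ : List Int) (L cs : Int) :
    ∀ (is : List Int) (acc : List Int) (j : Nat),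
      is.Pairwise (· ≤ ·) → (0 ≤ cs) →
      (∀ i ∈ is, ∀ q (hq : q < occ.length), q < j → occ[q] < i * cs) →
      (is.foldl (fun (st : List Int × Nat) i =>
          (st.1 ++ [(pvNextFrom occ L (i * cs) st.2).1], (pvNextFrom occ L (i * cs) st.2).2)) (acc, j)).1
        = acc ++ is.map (fun i => pvFirstGE occ L (i * cs)) := by
  intro is
  induction is with
  | nil => intro acc j _ _ _; simp
  | cons i t ih =>
    intro acc j hpw hcs hinv
    simp only [List.foldl_cons, List.map_cons]
    obtain ⟨h1, h2⟩ := pvNextFrom_spec occ L (i * cs) (occ.length - j) j (by omega)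
      (fun q hq hql => hinv i (by simp) q hq hql)
    rw [h1]
    have := ih (acc ++ [pvFirstGE occ L (i * cs)]) (pvNextFrom occ L (i * cs) j).2
      (List.Pairwise.of_cons hpw) hcs
      (fun i' hi' q hq hql => by
        have hle : i ≤ i' := (List.pairwise_cons.mp hpw).1 i' hi'
        have := h2 q hq hql
        nlinarith)
    rw [this]; simp

-- A's in-place update loop over the middle indices is a map over the middle
theorem pv_foldA (u : Int → Int) :
    ∀ (mid pre post : List Int),
      (PySem.List.pyRange (pre.length : Int) ((pre.length : Int) + (mid.length : Int)) 1).foldl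
        (fun bs bi => PySem.List.pySetD bs bi (u (PySem.List.pyGetD bs bi 0)))
        (pre ++ mid ++ post)
      = pre ++ mid.map u ++ post := by
  intro mid
  induction mid with
  | nil => intro pre post; rw [PySem.List.pyRange_one_eq_nil (by simp)]; simp
  | cons x t ih =>
    intro pre post
    rw [PySem.List.pyRange_one_cons (by simp only [List.length_cons]; push_cast; omega)]
    simp only [List.foldl_cons]
    have hget : PySem.List.pyGetD (pre ++ (x :: t) ++ post) (pre.length : Int) 0 = x := by
      rw [PySem.List.pyGetD_natCast]
      rw [List.append_assoc]
      rw [List.getD_eq_getElem?_getD, List.getElem?_append_right (by omega)]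
      simp
    rw [hget, PySem.List.pySetD_natCast]
    have hset : (pre ++ (x :: t) ++ post).set pre.length (u x) = (pre ++ [u x]) ++ t ++ post := by
      rw [List.append_assoc, List.set_append_right _ _ (by omega)]
      simp
    rw [hset]
    have harith : ((pre.length : Int) + 1) = ((pre ++ [u x]).length : Int) := by simp
    have harith2 : (pre.length : Int) + ((t.length : Int) + 1) = ((pre ++ [u x]).length : Int) + (t.length : Int) := by
      simp; omega
    calc (PySem.List.pyRange ((pre.length : Int) + 1) ((pre.length : Int) + ((t.length:Int) + 1)) 1).foldl
          (fun bs bi => PySem.List.pySetD bs bi (u (PySem.List.pyGetD bs bi 0)))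
          ((pre ++ [u x]) ++ t ++ post)
        = (pre ++ [u x]) ++ t.map u ++ post := by rw [harith, harith2]; exact ih (pre ++ [u x]) post
      _ = pre ++ (x :: t).map u ++ post := by simp
    -- (the `calc` already closed the goal)

-- setting index -1 of xs ++ [x] replaces the last element
theorem pv_pySetD_neg_one (xs : List Int) (x v : Int) :
    PySem.List.pySetD (xs ++ [x]) (-1) v = xs ++ [v] := by
  simp [PySem.List.pySetD, PySem.List.pySet?, PySem.List.pyIdx?]

-- find? on a strictly increasing list returns the minimal satisfying element
theorem pv_find?_sorted (l : List Int) (p : Int → Bool) (q : Int) :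
    l.Pairwise (· < ·) → q ∈ l → p q = true → (∀ x ∈ l, p x = true → q ≤ x) →
    l.find? p = some q := by
  induction l with
  | nil => simp
  | cons h t ih =>
    intro hpw hq hp hmin
    by_cases hph : p h
    · rw [List.find?_cons_of_pos hph]
      have hqh : q ≤ h := hmin h (by simp) hph
      rcases List.mem_cons.mp hq with rfl | hqt
      · rfl
      · have : h < q := (List.pairwise_cons.mp hpw).1 q hqt
        omega
    · rw [List.find?_cons_of_neg hph]
      have hqt : q ∈ t := by
        rcases List.mem_cons.mp hq with rfl | hqt
        · exact absurd hp hph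
        · exact hqt
      exact ih (List.Pairwise.of_cons hpw) hqt hp (fun x hx => hmin x (by simp [hx]))

-- prefix at a later drop is an infix of the earlier drop
theorem pv_prefix_drop_infix {tk l : List Char} {a b : Nat} (hab : a ≤ b)
    (h : tk <+: l.drop b) : tk <:+: l.drop a := by
  have : l.drop b = (l.drop a).drop (b - a) := by
    rw [List.drop_drop]; congr 1; omega
  rw [this] at h
  exact h.isInfix.trans (List.drop_suffix (b - a) (l.drop a)).isInfix

-- membership in B's occurrence list
theorem pv_mem_occ (text tok : String) (x : Int) (_htok : tok ≠ "") :
    x ∈ (PySem.List.pyRange 0 (PySem.Str.len text - PySem.Str.len tok + 1) 1).filter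
        (fun p => PySem.Str.slice text (some p) (some (p + PySem.Str.len tok)) == tok)
    ↔ (0 ≤ x ∧ x + PySem.Str.len tok ≤ PySem.Str.len text ∧
        tok.toList <+: text.toList.drop x.toNat) := by
  rw [List.mem_filter, PySem.List.mem_pyRange_one]
  constructor
  · rintro ⟨⟨hx0, hxu⟩, hsl⟩
    refine ⟨hx0, by omega, ?_⟩
    have heq : PySem.Str.slice text (some x) (some (x + PySem.Str.len tok)) = tok := by
      simpa using hsl
    have hlist : (PySem.Str.slice text (some x) (some (x + PySem.Str.len tok))).toList = tok.toList := by
      rw [heq]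
    rw [PySem.Str.toList_slice, PySem.Chars.slice_eq_listSlice,
        PySem.List.slice_toNat _ hx0 (by simp [PySem.Str.len_eq] at hxu ⊢; omega)] at hlist
    have hm : (x + PySem.Str.len tok).toNat - x.toNat = tok.toList.length := by
      simp [PySem.Str.len_eq] at hxu ⊢; omega
    rw [hm] at hlist
    rw [List.prefix_iff_eq_take]
    exact hlist.symm
  · rintro ⟨hx0, hxu, hpre⟩
    have hlen := hpre.length_le
    simp only [List.length_drop] at hlen
    refine ⟨⟨hx0, ?_⟩, ?_⟩
    · simp [PySem.Str.len_eq] at hxu ⊢; omega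
    · simp only [beq_iff_eq]
      rw [← String.toList_inj, PySem.Str.toList_slice, PySem.Chars.slice_eq_listSlice,
          PySem.List.slice_toNat _ hx0 (by simp [PySem.Str.len_eq] at hxu ⊢; omega)]
      have hm : (x + PySem.Str.len tok).toNat - x.toNat = tok.toList.length := by
        simp [PySem.Str.len_eq] at hxu ⊢; omega
      rw [hm]
      exact (List.prefix_iff_eq_take.mp hpre).symm

-- occ is strictly increasing
theorem pv_occ_pairwise (text tok : String) :
    ((PySem.List.pyRange 0 (PySem.Str.len text - PySem.Str.len tok + 1) 1).filter
      (fun p => PySem.Str.slice text (some p) (some (p + PySem.Str.len tok)) == tok)).Pairwise (· < ·) :=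
  List.Pairwise.filter _ (PySem.List.pairwise_lt_pyRange_one _ _)

-- the per-boundary value A computes equals B's occurrence-list lookup
theorem pv_g_eq_firstGE (text tok : String) (s : Int) (htok : tok ≠ "")
    (hs0 : 0 ≤ s) (hsL : s ≤ PySem.Str.len text) :
    (if PySem.Str.findFrom text tok s = -1 then PySem.Str.len text
     else PySem.Str.findFrom text tok s)
    = pvFirstGE
        ((PySem.List.pyRange 0 (PySem.Str.len text - PySem.Str.len tok + 1) 1).filter
          (fun p => PySem.Str.slice text (some p) (some (p + PySem.Str.len tok)) == tok))
        (PySem.Str.len text) s := by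
  have hLlen : PySem.Str.len text = (text.toList.length : Int) := by simp [PySem.Str.len_eq]
  have hmlen : PySem.Str.len tok = (tok.toList.length : Int) := by simp [PySem.Str.len_eq]
  have hsle : s.toNat ≤ text.toList.length := by omega
  have hff2 : PySem.Str.findFrom text tok s
      = (if PySem.Chars.find (text.toList.drop s.toNat) tok.toList = -1 then -1
         else (s.toNat : Int) + PySem.Chars.find (text.toList.drop s.toNat) tok.toList) := by
    have hsnat : s = ((s.toNat : Nat) : Int) := (Int.toNat_of_nonneg hs0).symm
    have hff : PySem.Str.findFrom text tok s
        = PySem.Chars.findFrom text.toList tok.toList s := by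
      simp [PySem.Str.findFrom_eq]
    conv_lhs => rw [hff, hsnat]
    rw [PySem.Chars.findFrom_natCast _ _ s.toNat hsle]
  rw [hff2]
  by_cases hr : PySem.Chars.find (text.toList.drop s.toNat) tok.toList = -1
  · have hnoocc : ¬ tok.toList <:+: text.toList.drop s.toNat :=
      (PySem.Chars.find_eq_neg_one_iff _ _).mp hr
    have hnone :
        ((PySem.List.pyRange 0 (PySem.Str.len text - PySem.Str.len tok + 1) 1).filter
          (fun p => PySem.Str.slice text (some p) (some (p + PySem.Str.len tok)) == tok)).find?
          (fun x => decide (s ≤ x)) = none := by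
      rw [List.find?_eq_none]
      intro x hx
      simp only [decide_eq_true_eq]
      intro hsx
      obtain ⟨hx0, hxm, hpre⟩ := (pv_mem_occ text tok x htok).mp hx
      exact hnoocc (pv_prefix_drop_infix (a := s.toNat) (b := x.toNat) (by omega) hpre)
    rw [hr]
    simp only [reduceIte]
    unfold pvFirstGE
    rw [hnone]
  · have hr0 : 0 ≤ PySem.Chars.find (text.toList.drop s.toNat) tok.toList := by
      have := PySem.Chars.neg_one_le_find (text.toList.drop s.toNat) tok.toList
      omega
    obtain ⟨hpre, hmin⟩ := PySem.Chars.find_spec hr0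
    set r := PySem.Chars.find (text.toList.drop s.toNat) tok.toList with hrdef
    have hdq : (text.toList.drop s.toNat).drop r.toNat = text.toList.drop (s.toNat + r.toNat) := by
      rw [List.drop_drop]
    rw [hdq] at hpre
    have hql := hpre.length_le
    simp only [List.length_drop] at hql
    have htokpos : 0 < tok.toList.length := by
      cases h : tok.toList with
      | nil => exact absurd (String.toList_inj.mp (by simp [h])) htok
      | cons c cs => simp
    have hqmem : ((s.toNat + r.toNat : Nat) : Int) ∈
        (PySem.List.pyRange 0 (PySem.Str.len text - PySem.Str.len tok + 1) 1).filter
          (fun p => PySem.Str.slice text (some p) (some (p + PySem.Str.len tok)) == tok) := by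
      rw [pv_mem_occ text tok _ htok]
      refine ⟨by positivity, by rw [hmlen, hLlen]; omega, ?_⟩
      rw [Int.toNat_natCast]
      exact hpre
    have hsome :
        ((PySem.List.pyRange 0 (PySem.Str.len text - PySem.Str.len tok + 1) 1).filter
          (fun p => PySem.Str.slice text (some p) (some (p + PySem.Str.len tok)) == tok)).find?
          (fun x => decide (s ≤ x)) = some ((s.toNat + r.toNat : Nat) : Int) := by
      apply pv_find?_sorted _ _ _ (pv_occ_pairwise text tok) hqmem
      · simp only [decide_eq_true_eq]
        omega
      · intro x hx hsx
        simp only [decide_eq_true_eq] at hsx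
        obtain ⟨hx0, hxm, hprex⟩ := (pv_mem_occ text tok x htok).mp hx
        by_contra hlt
        push Not at hlt
        have hxd : text.toList.drop x.toNat
            = (text.toList.drop s.toNat).drop (x.toNat - s.toNat) := by
          rw [List.drop_drop]; congr 1; omega
        rw [hxd] at hprex
        exact hmin (x.toNat - s.toNat) (by omega) hprex
    have hne : ¬ ((s.toNat : Int) + r = -1) := by omega
    rw [if_neg hr, if_neg hne]
    simp only [pvFirstGE, hsome]
    push_cast
    omega

-- ===== VERDICT (by name: the statement is the Claim_ definition above) =====
theorem find_chunk_boundaries_text_spec : Claim_equal_find_chunk_boundaries_text := by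
  intro text k tok _
  unfold Spec_find_chunk_boundaries_text
  simp only [find_chunk_boundaries_text, find_chunk_boundaries_text_alt]
  by_cases h1 : PySem.Str.len text = 0 ∨ k ≤ 1
  · rw [if_pos h1, if_pos h1]
  · rw [if_neg h1, if_neg h1]
    push Not at h1
    obtain ⟨hL0, hk1⟩ := h1
    have hLnn : 0 ≤ PySem.Str.len text := by
      rw [show PySem.Str.len text = (text.toList.length : Int) from by simp [PySem.Str.len_eq]]
      positivity
    set L := PySem.Str.len text with hLdef
    set cs := PySem.Int.floordiv L k with hcsdef
    have hk0 : (0:Int) < k := by omega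
    have hcs0 : 0 ≤ cs := by
      rw [hcsdef, PySem.Int.floordiv_eq_ediv_of_pos hk0]
      exact Int.ediv_nonneg hLnn (le_of_lt hk0)
    have hkcs : k * cs ≤ L := by
      have h := PySem.Int.floordiv_mul_add_mod L k
      have hm := PySem.Int.mod_nonneg L hk0
      rw [← hcsdef] at h
      nlinarith
    have hB0 : (PySem.List.pyRange 0 (k+1) 1).map (fun i => i * cs)
        = (0 :: (PySem.List.pyRange 1 k 1).map (fun i => i * cs)) ++ [k * cs] := by
      rw [PySem.List.pyRange_one_succ_right (by omega : (0:Int) ≤ k)]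
      rw [PySem.List.pyRange_one_cons (by omega : (0:Int) < k)]
      simp
    have hBset : PySem.List.pySetD ((PySem.List.pyRange 0 (k+1) 1).map (fun i => i * cs)) (-1) L
        = [0] ++ (PySem.List.pyRange 1 k 1).map (fun i => i * cs) ++ [L] := by
      rw [hB0, pv_pySetD_neg_one]
      simp
    by_cases h2 : tok = ""
    · rw [if_pos h2, if_pos h2, hBset]
      apply PySem.List.sorted_eq_sorted_of_perm _ _ _ (fun a b h => h)
      rw [List.perm_ext_iff_of_nodup (PySem.Set.nodup_ofList _)
        (PySem.Set.nodup_union _ _ (PySem.Set.nodup_ofList _))]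
      intro a
      rw [PySem.List.pyRange_one_cons (by omega : (0:Int) < k)]
      simp only [PySem.Set.mem_ofList, PySem.Set.mem_union, List.mem_append, List.mem_cons,
        List.map_cons, zero_mul, List.not_mem_nil]
      tauto
    · rw [if_neg h2, if_neg h2, hBset]
      -- name the middle segment and the occurrence list
      set M := (PySem.List.pyRange 1 k 1).map (fun i => i * cs) with hMdef
      set occ := (PySem.List.pyRange 0 (L - PySem.Str.len tok + 1) 1).filter
        (fun p => PySem.Str.slice text (some p) (some (p + PySem.Str.len tok)) == tok) with hoccdef
      -- A's loop range is exactly the middle indices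
      have hrange : PySem.List.pyRange 1 (PySem.List.len ([0] ++ M ++ [L]) - 1) 1
          = PySem.List.pyRange ((([0]:List Int).length : Int))
              (((([0]:List Int).length : Int)) + ((M.length : Int))) 1 := by
        congr 1
        all_goals simp [PySem.List.len_eq]
        all_goals omega
      rw [hrange]
      -- A's step updates each cell from its own old value
      have hstep : (fun (bs : List Int) (bi : Int) =>
          if PySem.Str.findFrom text tok (PySem.List.pyGetD bs bi 0) = -1 then PySem.List.pySetD bs bi L
          else PySem.List.pySetD bs bi (PySem.Str.findFrom text tok (PySem.List.pyGetD bs bi 0)))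
        = (fun bs bi => PySem.List.pySetD bs bi
            ((fun s => if PySem.Str.findFrom text tok s = -1 then L else PySem.Str.findFrom text tok s)
              (PySem.List.pyGetD bs bi 0))) := by
        funext bs bi
        exact (apply_ite (PySem.List.pySetD bs bi) _ _ _).symm
      rw [hstep, pv_foldA (fun s => if PySem.Str.findFrom text tok s = -1 then L
        else PySem.Str.findFrom text tok s) M [0] [L]]
      -- B's pointer fold is the pure per-boundary map
      rw [pv_foldB occ L cs (PySem.List.pyRange 1 k 1) [] 0
        ((PySem.List.pairwise_lt_pyRange_one 1 k).imp le_of_lt) hcs0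
        (fun i _ q hq hql => absurd hql (Nat.not_lt_zero q))]
      -- the two middle segments agree pointwise
      have hmid : M.map (fun s => if PySem.Str.findFrom text tok s = -1 then L
            else PySem.Str.findFrom text tok s)
          = (PySem.List.pyRange 1 k 1).map (fun i => pvFirstGE occ L (i * cs)) := by
        rw [hMdef, List.map_map]
        apply List.map_congr_left
        intro i hi
        rw [PySem.List.mem_pyRange_one] at hi
        have h0 : 0 ≤ i * cs := mul_nonneg (by omega) hcs0
        have hiL : i * cs ≤ L := le_trans (mul_le_mul_of_nonneg_right (by omega : i ≤ k) hcs0) hkcs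
        exact pv_g_eq_firstGE text tok (i * cs) h2 h0 hiL
      rw [hmid]
      apply PySem.List.sorted_eq_sorted_of_perm _ _ _ (fun a b h => h)
      rw [List.perm_ext_iff_of_nodup (PySem.Set.nodup_ofList _)
        (PySem.Set.nodup_union _ _ (PySem.Set.nodup_ofList _))]
      intro a
      simp only [PySem.Set.mem_ofList, PySem.Set.mem_union, List.mem_append, List.mem_cons,
        List.nil_append, List.not_mem_nil]
      tauto
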